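-- pv_equiv track=rewrite | github.com/JessicaLopezEspejel/GeSERA | utils.py | get_automatic_summaries_gold_standard
-- ===== SOURCE A (Python) =====
-- def get_automatic_summaries_gold_standard(files_automatic_summaries, files_gold_standard):
-- 	""" Goal: Read in correct way the automatic summaries and model summaries (gold standard or human summaries)
-- 			  from TAC2008 dataset.
-- 	"""
-- 	dic_automatic_summaries = dict()
-- 	ID_subset_automatic_summary = ''
--
-- 	for path_automatic_summary in files_automatic_summaries:
-- 		dic_automatic_summaries[path_automatic_summary] = []
--
-- 	for path_gold_standard in files_gold_standard:
-- 		pattern_gold_standard = path_gold_standard.split('/')[-1].split('.')[0]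
--
-- 		for key, value in dic_automatic_summaries.items():
-- 			if pattern_gold_standard in key:
-- 				value.append(path_gold_standard)
-- 				dic_automatic_summaries[key] = value
--
-- 	return dic_automatic_summaries
-- ===== SOURCE B (Python) =====
-- def get_automatic_summaries_gold_standard(files_automatic_summaries, files_gold_standard):
--     """Index the gold files by their pattern once, then build each key's list by
--     merging the matching pattern groups and restoring gold order by original index."""
--     groups = {}
--     for i, path in enumerate(files_gold_standard):
--         groups.setdefault(path.split('/')[-1].split('.')[0], []).append((i, path))
--     result = {}
--     for key in files_automatic_summaries:
--         matched = []
--         for pattern, entries in groups.items():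
--             if pattern in key:
--                 matched.extend(entries)
--         matched.sort(key=lambda e: e[0])
--         result[key] = [path for _, path in matched]
--     return result
-- ===== Notes on version B (the rewrite author's own statement) =====
-- stated objective: alternative
-- what changed: Replaces A's populate-then-mutate nested passes by a different algorithm: B first builds a hash index grouping the gold files by their pattern (with original indices), then for each key merges the groups whose pattern occurs in the key and sorts the merged entries by original index to restore gold order; substring tests run once per (key, distinct pattern) instead of per (key, gold file).
import Mathlib
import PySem

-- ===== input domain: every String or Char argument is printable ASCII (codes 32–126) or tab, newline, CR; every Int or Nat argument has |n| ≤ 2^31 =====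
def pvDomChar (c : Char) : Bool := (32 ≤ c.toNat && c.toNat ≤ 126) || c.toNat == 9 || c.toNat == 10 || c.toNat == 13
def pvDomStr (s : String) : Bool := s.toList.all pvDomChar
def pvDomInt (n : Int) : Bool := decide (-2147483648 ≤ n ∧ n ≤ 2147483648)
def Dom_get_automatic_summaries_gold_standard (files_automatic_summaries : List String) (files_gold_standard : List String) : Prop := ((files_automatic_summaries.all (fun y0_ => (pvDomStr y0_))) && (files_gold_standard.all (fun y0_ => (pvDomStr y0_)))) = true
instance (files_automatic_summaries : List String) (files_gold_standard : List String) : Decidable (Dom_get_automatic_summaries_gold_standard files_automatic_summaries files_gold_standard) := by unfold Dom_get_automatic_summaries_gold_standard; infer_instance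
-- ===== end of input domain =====

-- B replaces A's populate-then-mutate nested passes by a different algorithm: a hash
-- index grouping the gold files by pattern (with original indices), then a per-key
-- merge of the matching groups, sorted back into gold order by index (alternative).

-- ===== PORT A =====
-- path.split('/')[-1].split('.')[0]  (split? is some for the nonempty separators "/" and ".";
-- the lists are nonempty, so the pyGetD defaults are never used — exact)
def pvPattern (path : String) : String :=
  PySem.List.pyGetD
    ((PySem.Str.split? (PySem.List.pyGetD ((PySem.Str.split? path "/").getD []) (-1) "") ".").getD [])
    0 ""

-- body of A's inner 'for key, value in dic.items():' loop (append + reassignment = overwrite in place)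
def pvGoldInner (pattern path_gold : String) (d2 : PySem.Dict String (List String))
    (kv : String × List String) : PySem.Dict String (List String) :=
  if PySem.Str.isIn pattern kv.1 then d2.insert kv.1 (kv.2 ++ [path_gold]) else d2

-- one iteration of A's outer gold loop: snapshot d.items, fold the inner loop over it
def pvGoldPass (d : PySem.Dict String (List String)) (path_gold : String) :
    PySem.Dict String (List String) :=
  d.items.foldl (pvGoldInner (pvPattern path_gold) path_gold) d

def get_automatic_summaries_gold_standard (files_automatic_summaries : List String) (files_gold_standard : List String) : List (String × List String) :=
  -- first loop: dic[path] = [] for every automatic-summary path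
  let dic0 : PySem.Dict String (List String) :=
    files_automatic_summaries.foldl (fun d path => d.insert path []) PySem.Dict.empty
  -- second loop over the gold-standard files
  (files_gold_standard.foldl pvGoldPass dic0).items

-- ===== PORT B =====
-- groups.setdefault(pattern, []).append((i, path))  over enumerate(files_gold_standard)
def pvGroups (files_gold_standard : List String) : PySem.Dict String (List (Int × String)) :=
  (PySem.List.enumerate files_gold_standard).foldl
    (fun d ig => d.modify (pvPattern ig.2) [] (· ++ [ig])) PySem.Dict.empty

-- the inner merge loop: 'if pattern in key: matched.extend(entries)'
def pvMerge (groups : PySem.Dict String (List (Int × String))) (key : String) :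
    List (Int × String) :=
  groups.items.foldl (fun acc q => if PySem.Str.isIn q.1 key then acc ++ q.2 else acc) []

-- matched.sort(key=lambda e: e[0]); [path for _, path in matched]
def pvVal (groups : PySem.Dict String (List (Int × String))) (key : String) : List String :=
  (PySem.List.sorted (pvMerge groups key) (fun e => e.1) false).map (fun e => e.2)

def get_automatic_summaries_gold_standard_alt (files_automatic_summaries : List String) (files_gold_standard : List String) : List (String × List String) :=
  let groups := pvGroups files_gold_standard
  (files_automatic_summaries.foldl (fun r key => r.insert key (pvVal groups key))
    PySem.Dict.empty).items

-- ===== PRECONDITION & SPEC =====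
def Spec_get_automatic_summaries_gold_standard (files_automatic_summaries : List String) (files_gold_standard : List String) (out : List (String × List String)) : Prop := out = get_automatic_summaries_gold_standard_alt files_automatic_summaries files_gold_standard
instance (files_automatic_summaries : List String) (files_gold_standard : List String) (out : List (String × List String)) : Decidable (Spec_get_automatic_summaries_gold_standard files_automatic_summaries files_gold_standard out) := by unfold Spec_get_automatic_summaries_gold_standard; infer_instance

-- ===== CLAIM (what is proved, stated in full; the proofs are below) =====
def Claim_equal_get_automatic_summaries_gold_standard : Prop := ∀ (files_automatic_summaries : List String) (files_gold_standard : List String), Dom_get_automatic_summaries_gold_standard files_automatic_summaries files_gold_standard → Spec_get_automatic_summaries_gold_standard files_automatic_summaries files_gold_standard (get_automatic_summaries_gold_standard files_automatic_summaries files_gold_standard)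

-- ===== LEMMAS AND PROOFS =====

-- A loop 'for k in ks: d[k] = V(k)' with a state-independent value V: the dict holds the
-- deduplicated keys (first occurrences, in order), each mapped to V(k).  Used for A's
-- first loop (V = const []) and for B's result loop (V = pvVal groups).
theorem pv_valloop (V : String → List String) : ∀ (ks : List String) (d : PySem.Dict String (List String)),
    d.items = d.keys.map (fun k => (k, V k)) →
    (ks.foldl (fun d path => d.insert path (V path)) d).items
      = (PySem.Set.update d.keys ks).map (fun k => (k, V k)) := by
  intro ks
  induction ks with
  | nil => intro d h; simpa [PySem.Set.update] using h
  | cons k ks ih =>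
    intro d h
    simp only [List.foldl_cons]
    have hupd : PySem.Set.update d.keys (k :: ks)
        = PySem.Set.update (PySem.Set.add d.keys k) ks := by
      simp [PySem.Set.update]
    by_cases hc : d.contains k = true
    · have hkeys := PySem.Dict.keys_insert_of_contains d (V k) hc
      have hadd : PySem.Set.add d.keys k = d.keys := by
        have : k ∈ d.keys := (PySem.Dict.contains_iff_mem_keys d k).mp hc
        simp [PySem.Set.add, this]
      have hitems : (d.insert k (V k)).items = d.items := by
        rw [PySem.Dict.items_insert_of_contains d (V k) hc, h]
        rw [List.map_map]
        apply List.map_congr_left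
        intro x _
        by_cases hx : x = k <;> simp [Function.comp, hx]
      rw [hupd, hadd]
      have hrec := ih (d.insert k (V k)) (by rw [hitems, hkeys, h])
      rw [hkeys] at hrec
      exact hrec
    · have hc' : d.contains k = false := by simpa using hc
      have hkeys := PySem.Dict.keys_insert_of_not_contains d (V k) hc'
      have hadd : PySem.Set.add d.keys k = d.keys ++ [k] := by
        have : k ∉ d.keys := fun hm => hc ((PySem.Dict.contains_iff_mem_keys d k).mpr hm)
        simp [PySem.Set.add, this]
      rw [hupd, hadd, ← hkeys]
      exact ih _ (by
        rw [PySem.Dict.items_insert_of_not_contains d (V k) hc', h, hkeys]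
        simp)

-- A's inner loop over a snapshot of the items, as a pointwise map on the items list.
theorem pv_inner (p g : String) : ∀ (ks2 : List String) (F : String → List String)
    (d2 : PySem.Dict String (List String)),
    ks2.Nodup → (∀ k ∈ ks2, d2.contains k = true) →
    ((ks2.map (fun k => (k, F k))).foldl (pvGoldInner p g) d2).items
      = d2.items.map (fun q =>
          if q.1 ∈ ks2 ∧ PySem.Str.isIn p q.1 = true then (q.1, F q.1 ++ [g]) else q) := by
  intro ks2
  induction ks2 with
  | nil => intro F d2 _ _; simp
  | cons k rest ih =>
    intro F d2 hnd hcon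
    have hk : d2.contains k = true := hcon k (by simp)
    have hknr : k ∉ rest := (List.nodup_cons.mp hnd).1
    simp only [List.map_cons, List.foldl_cons]
    by_cases hp : PySem.Chars.isIn p.toList k.toList = true
    · have hstep : pvGoldInner p g d2 (k, F k) = d2.insert k (F k ++ [g]) := by
        simp [pvGoldInner, hp]
      rw [hstep]
      have hrec := ih F (d2.insert k (F k ++ [g])) (List.nodup_cons.mp hnd).2
        (by
          intro k' hk'
          rw [PySem.Dict.contains_insert]
          simp [hcon k' (by simp [hk'])])
      rw [hrec, PySem.Dict.items_insert_of_contains d2 (F k ++ [g]) hk, List.map_map]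
      apply List.map_congr_left
      intro q _
      by_cases hqk : q.1 = k
      · simp [Function.comp, hqk, hp, hknr]
      · have : (q.1 == k) = false := by simpa using hqk
        simp only [Function.comp, this, Bool.false_eq_true, if_false]
        by_cases hmem : q.1 ∈ rest <;> simp [hmem, hqk]
    · have hstep : pvGoldInner p g d2 (k, F k) = d2 := by
        simp [pvGoldInner, hp]
      rw [hstep, ih F d2 (List.nodup_cons.mp hnd).2 (fun k' hk' => hcon k' (by simp [hk']))]
      apply List.map_congr_left
      intro q _
      by_cases hqk : q.1 = k
      · simp [hqk, hp]
      · by_cases hmem : q.1 ∈ rest <;> simp [hmem, hqk]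

-- One pass of A's gold loop on a dict whose items are ks.map (k, F k).
theorem pv_perGold (g : String) (ks : List String) (F : String → List String)
    (d : PySem.Dict String (List String)) (hnd : ks.Nodup)
    (hit : d.items = ks.map (fun k => (k, F k))) :
    (pvGoldPass d g).items
      = ks.map (fun k => (k, if PySem.Str.isIn (pvPattern g) k then F k ++ [g] else F k)) := by
  have hkeys : d.keys = ks := by
    simp [PySem.Dict.keys, hit, List.map_map, Function.comp_def]
  have hcon : ∀ k ∈ ks, d.contains k = true := by
    intro k hk
    exact (PySem.Dict.contains_iff_mem_keys d k).mpr (hkeys ▸ hk)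
  unfold pvGoldPass
  rw [hit, pv_inner (pvPattern g) g ks F d hnd hcon, hit, List.map_map]
  apply List.map_congr_left
  intro k hkmem
  by_cases hp : PySem.Chars.isIn (pvPattern g).toList k.toList = true <;>
    simp [Function.comp, hkmem, hp]

-- The whole gold loop accumulates, per key, the filtered gold files in order.
theorem pv_goldloop : ∀ (gs : List String) (ks : List String) (F : String → List String)
    (d : PySem.Dict String (List String)), ks.Nodup →
    d.items = ks.map (fun k => (k, F k)) →
    (gs.foldl pvGoldPass d).items
      = ks.map (fun k => (k, F k ++ gs.filter (fun g => PySem.Str.isIn (pvPattern g) k))) := by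
  intro gs
  induction gs with
  | nil => intro ks F d _ hit; simpa using hit
  | cons g gs ih =>
    intro ks F d hnd hit
    simp only [List.foldl_cons]
    have hit' := pv_perGold g ks F d hnd hit
    rw [ih ks (fun k => if PySem.Str.isIn (pvPattern g) k then F k ++ [g] else F k)
        (pvGoldPass d g) hnd hit']
    apply List.map_congr_left
    intro k _
    by_cases hp : PySem.Chars.isIn (pvPattern g).toList k.toList = true <;>
      simp [hp]

-- B's merge loop as filter + flatMap over the items snapshot.
theorem pv_merge_flatMap (key : String) :
    ∀ (l : List (String × List (Int × String))) (acc : List (Int × String)),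
    l.foldl (fun acc q => if PySem.Str.isIn q.1 key then acc ++ q.2 else acc) acc
      = acc ++ (l.filter (fun q => PySem.Str.isIn q.1 key)).flatMap (fun q => q.2) := by
  intro l
  induction l with
  | nil => intro acc; simp
  | cons q l ih =>
    intro acc
    simp only [List.foldl_cons, List.filter_cons]
    by_cases hq : PySem.Str.isIn q.1 key = true
    · rw [if_pos hq, ih]
      simp only [hq, if_true, List.flatMap_cons, List.append_assoc]
    · rw [if_neg hq, ih]
      have hq' : PySem.Chars.isIn q.1.toList key.toList = false := by simpa using hq
      simp [hq']

-- flattening a group-by partition back is a permutation of the original list.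
theorem pv_grp_perm : ∀ (P : List String) (l : List (String × (Int × String))),
    P.Nodup → (∀ q ∈ l, q.1 ∈ P) →
    (P.flatMap (fun p => (l.filter (fun q => q.1 == p)).map (fun q => q.2))).Perm
      (l.map (fun q => q.2)) := by
  intro P
  induction P with
  | nil =>
    intro l _ hmem
    have : l = [] := by
      cases l with
      | nil => rfl
      | cons q l => exact absurd (hmem q (by simp)) (by simp)
    simp [this]
  | cons p P ih =>
    intro l hnd hmem
    have hpP : p ∉ P := (List.nodup_cons.mp hnd).1
    have htail : ∀ p' ∈ P, (l.filter (fun q => !(q.1 == p))).filter (fun q => q.1 == p')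
        = l.filter (fun q => q.1 == p') := by
      intro p' hp'
      have hne : p' ≠ p := fun h => hpP (h ▸ hp')
      rw [List.filter_filter]
      apply List.filter_congr
      intro q _
      by_cases hq : q.1 = p'
      · rw [hq]
        simp [hne]
      · have h2 : (q.1 == p') = false := by simpa using hq
        simp [h2]
    have hrec := ih (l.filter (fun q => !(q.1 == p))) (List.nodup_cons.mp hnd).2
      (by
        intro q hq
        have hq' := List.of_mem_filter hq
        have hmq := hmem q (List.mem_of_mem_filter hq)
        simp only [List.mem_cons] at hmq
        rcases hmq with h | h
        · exfalso
          rw [h] at hq'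
          simp at hq'
        · exact h)
    have hflat : P.flatMap (fun p' => (l.filter (fun q => q.1 == p')).map (fun q => q.2))
        = P.flatMap (fun p' =>
            (((l.filter (fun q => !(q.1 == p))).filter (fun q => q.1 == p')).map (fun q => q.2))) := by
      apply List.flatMap_congr
      intro p' hp'
      rw [htail p' hp']
    simp only [List.flatMap_cons]
    rw [hflat]
    apply List.Perm.trans (List.Perm.append_left _ hrec)
    rw [← List.map_append]
    exact List.Perm.map _ (List.filter_append_perm _ l)

-- B's per-key value is exactly the filtered gold list in original order.
theorem pv_val_eq (fgs : List String) (k : String) :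
    pvVal (pvGroups fgs) k = fgs.filter (fun g => PySem.Str.isIn (pvPattern g) k) := by
  -- abbreviations
  set pairs : List (String × (Int × String)) :=
    (PySem.List.enumerate fgs).map (fun ig => (pvPattern ig.2, ig)) with hpairs
  have hgrp : pvGroups fgs
      = pairs.foldl (fun d p => d.modify p.1 [] (· ++ [p.2])) PySem.Dict.empty := by
    rw [hpairs, List.foldl_map]
    rfl
  have hnodupK : (pvGroups fgs).keys.Nodup := by
    rw [hgrp]
    exact PySem.Dict.nodup_keys_foldl_modify_key pairs _ _ _ _ (by simp)
  have hgetD : ∀ p, (pvGroups fgs).getD p []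
      = (pairs.filter (fun q => q.1 == p)).map (fun q => q.2) := by
    intro p
    rw [hgrp, PySem.Dict.getD_foldl_modify_append]
    simp
  have hkeymem : ∀ q ∈ pairs, q.1 ∈ (pvGroups fgs).keys := by
    intro q hq
    rw [hgrp, PySem.Dict.keys_foldl_modify_key]
    have : q.1 ∈ pairs.map (fun q => q.1) := List.mem_map_of_mem hq
    simp only [PySem.Dict.keys_empty, PySem.Set.update_nil_left]
    exact (PySem.Set.mem_ofList _ _).mpr this
  have hitems : (pvGroups fgs).items
      = (pvGroups fgs).keys.map (fun p => (p, (pvGroups fgs).getD p [])) :=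
    PySem.Dict.items_eq_map_keys _ hnodupK []
  -- the merge as a flatMap over the matching patterns
  set P' := (pvGroups fgs).keys.filter (fun p => PySem.Str.isIn p k) with hP'
  set l' := pairs.filter (fun q => PySem.Str.isIn q.1 k) with hl'
  have hmerge : pvMerge (pvGroups fgs) k
      = P'.flatMap (fun p => (l'.filter (fun q => q.1 == p)).map (fun q => q.2)) := by
    rw [pvMerge, pv_merge_flatMap, List.nil_append, hitems, List.filter_map, List.flatMap_map]
    apply List.flatMap_congr
    intro p hp
    have hpk : PySem.Chars.isIn p.toList k.toList = true := by
      have := List.of_mem_filter hp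
      simpa using this
    simp only [hgetD p, hl', List.filter_filter]
    congr 1
    apply List.filter_congr
    intro q _
    by_cases hq : q.1 = p
    · simp [hq, hpk]
    · have : (q.1 == p) = false := by simpa using hq
      simp [this]
  -- the merged list is a permutation of l'.map (·.2)
  have hperm : (pvMerge (pvGroups fgs) k).Perm (l'.map (fun q => q.2)) := by
    rw [hmerge]
    apply pv_grp_perm
    · exact hnodupK.filter _
    · intro q hq
      have hq1 := List.of_mem_filter hq
      have hq2 := List.mem_of_mem_filter hq
      exact List.mem_filter.mpr ⟨hkeymem q hq2, hq1⟩
  -- l'.map (·.2) is the index-filtered enumerate list, strictly increasing in .1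
  have hl'map : l'.map (fun q => q.2)
      = (PySem.List.enumerate fgs).filter (fun ig => PySem.Str.isIn (pvPattern ig.2) k) := by
    rw [hl', hpairs, List.filter_map, List.map_map]
    simp [Function.comp_def]
  have hpw : (l'.map (fun q => q.2)).Pairwise (fun a b => a.1 < b.1) := by
    rw [hl'map]
    exact (PySem.List.pairwise_lt_enumerate fgs 0).filter _
  -- sort restores exactly that list
  have hsort : PySem.List.sorted (pvMerge (pvGroups fgs) k) (fun e => e.1) false
      = l'.map (fun q => q.2) :=
    PySem.List.sorted_eq_of_perm_of_pairwise_lt _ _ (fun e => e.1) hperm.symm hpw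
  rw [pvVal, hsort, hl'map]
  -- drop the indices
  have : fgs = (PySem.List.enumerate fgs).map (fun ig => ig.2) :=
    (PySem.List.map_snd_enumerate fgs 0).symm
  conv_rhs => rw [this, List.filter_map]
  rfl

-- ===== VERDICT (by name: the statement is the Claim_ definition above) =====
theorem get_automatic_summaries_gold_standard_spec : Claim_equal_get_automatic_summaries_gold_standard := by
  intro fas fgs _
  unfold Spec_get_automatic_summaries_gold_standard
  unfold get_automatic_summaries_gold_standard get_automatic_summaries_gold_standard_alt
  have hempty : (PySem.Dict.empty : PySem.Dict String (List String)).items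
      = (PySem.Dict.empty : PySem.Dict String (List String)).keys.map
          (fun kk => (kk, ([] : List String))) := by
    simp [PySem.Dict.empty, PySem.Dict.keys]
  -- A's first loop
  have hA0 := pv_valloop (fun _ => []) fas PySem.Dict.empty hempty
  have hnd : (PySem.Set.update (PySem.Dict.empty : PySem.Dict String (List String)).keys fas).Nodup := by
    simp only [PySem.Dict.keys, PySem.Dict.empty, List.map_nil, PySem.Set.update_nil_left]
    exact PySem.Set.nodup_ofList fas
  -- A's gold loop
  rw [pv_goldloop fgs _ (fun _ => []) _ hnd hA0]
  -- B's result loop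
  have hBempty : (PySem.Dict.empty : PySem.Dict String (List String)).items
      = (PySem.Dict.empty : PySem.Dict String (List String)).keys.map
          (fun kk => (kk, pvVal (pvGroups fgs) kk)) := by
    simp [PySem.Dict.empty, PySem.Dict.keys]
  rw [pv_valloop (pvVal (pvGroups fgs)) fas PySem.Dict.empty hBempty]
  apply List.map_congr_left
  intro k _
  rw [pv_val_eq fgs k]
  simp
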